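-- pv_equiv track=rewrite | github.com/Abhi2748/resume-match-ai | match_engine.py | compare_skills
-- ===== SOURCE A (Python) =====
-- def compare_skills(resume_skills, jd_skills):
--     resume_set = set([s.lower() for s in resume_skills])
--     jd_set = set([s.lower() for s in jd_skills])
--
--     common = sorted(list(resume_set & jd_set))
--     missing = sorted(list(jd_set - resume_set))
--
--     return {
--         "common_skills": common,
--         "missing_skills": missing
--     }
-- ===== SOURCE B (Python) =====
-- def compare_skills(resume_skills, jd_skills):
--     r = sorted({s.lower() for s in resume_skills})
--     j = sorted({s.lower() for s in jd_skills})
--     common, missing = [], []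
--     i = k = 0
--     while k < len(j):
--         if i < len(r) and r[i] < j[k]:
--             i += 1
--         elif i < len(r) and r[i] == j[k]:
--             common.append(j[k]); i += 1; k += 1
--         else:
--             missing.append(j[k]); k += 1
--     return {"common_skills": common, "missing_skills": missing}
-- ===== Notes on version B (the rewrite author's own statement) =====
-- stated objective: alternative
-- what changed: Sorts the two deduplicated lowercased lists first and then computes common and missing in one two-pointer merge pass, producing both output lists already in sorted order instead of using set intersection/difference followed by two sorts.
import Mathlib
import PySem

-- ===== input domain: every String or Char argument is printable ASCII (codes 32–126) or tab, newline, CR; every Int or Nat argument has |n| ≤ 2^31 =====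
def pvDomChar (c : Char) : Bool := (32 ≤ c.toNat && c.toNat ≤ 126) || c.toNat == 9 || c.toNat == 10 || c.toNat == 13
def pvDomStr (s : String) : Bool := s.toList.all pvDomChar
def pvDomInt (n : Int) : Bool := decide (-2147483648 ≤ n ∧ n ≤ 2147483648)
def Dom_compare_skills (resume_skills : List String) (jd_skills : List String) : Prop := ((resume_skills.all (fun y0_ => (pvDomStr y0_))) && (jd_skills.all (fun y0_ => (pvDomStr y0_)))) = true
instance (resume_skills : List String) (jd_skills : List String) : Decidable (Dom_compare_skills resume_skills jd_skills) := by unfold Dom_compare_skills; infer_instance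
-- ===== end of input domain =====

-- B sorts the deduplicated lowercased lists first and computes common/missing in one
-- two-pointer merge pass (already sorted), instead of A's set intersection/difference plus two sorts (objective: alternative).


-- ===== PORT A =====
def compare_skills (resume_skills : List String) (jd_skills : List String) : List (String × List String) :=
  let resume_set : PySem.Set String := PySem.Set.ofList (resume_skills.map PySem.Str.lower)
  let jd_set : PySem.Set String := PySem.Set.ofList (jd_skills.map PySem.Str.lower)
  let common := PySem.List.sorted (PySem.Set.inter resume_set jd_set) (fun x => x) false
  let missing := PySem.List.sorted (PySem.Set.diff jd_set resume_set) (fun x => x) false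
  [("common_skills", common), ("missing_skills", missing)]

-- ===== PORT B =====
-- the while-loop of Source B: two pointers over the sorted lists, transcribed as recursion on the suffixes
def pvMergeLoop : List String → List String → List String × List String
  | _, [] => ([], [])
  | [], v :: js => let p := pvMergeLoop [] js; (p.1, v :: p.2)
  | x :: rs, v :: js =>
    if x < v then pvMergeLoop rs (v :: js)
    else if x = v then let p := pvMergeLoop rs js; (v :: p.1, p.2)
    else let p := pvMergeLoop (x :: rs) js; (p.1, v :: p.2)
termination_by r j => (j.length, r.length)

def compare_skills_alt (resume_skills : List String) (jd_skills : List String) : List (String × List String) :=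
  let r := PySem.List.sorted (PySem.Set.ofList (resume_skills.map PySem.Str.lower)) (fun x => x) false
  let j := PySem.List.sorted (PySem.Set.ofList (jd_skills.map PySem.Str.lower)) (fun x => x) false
  let p := pvMergeLoop r j
  [("common_skills", p.1), ("missing_skills", p.2)]

-- ===== PRECONDITION & SPEC =====
def Spec_compare_skills (resume_skills : List String) (jd_skills : List String) (out : List (String × List String)) : Prop := out = compare_skills_alt resume_skills jd_skills
instance (resume_skills : List String) (jd_skills : List String) (out : List (String × List String)) : Decidable (Spec_compare_skills resume_skills jd_skills out) := by unfold Spec_compare_skills; infer_instance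

-- ===== CLAIM =====
def Claim_equal_compare_skills : Prop := ∀ (resume_skills : List String) (jd_skills : List String), Dom_compare_skills resume_skills jd_skills → Spec_compare_skills resume_skills jd_skills (compare_skills resume_skills jd_skills)

-- ===== LEMMAS AND PROOFS =====

-- On strictly sorted inputs the merge loop computes the membership partition of j by r.
theorem pvMergeLoop_eq_filters (r j : List String)
    (hr : r.Pairwise (· < ·)) (hj : j.Pairwise (· < ·)) :
    pvMergeLoop r j = (j.filter (fun v => decide (v ∈ r)), j.filter (fun v => !decide (v ∈ r))) := by
  fun_induction pvMergeLoop r j with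
  | case1 r => simp
  | case2 v js p ih =>
    simp only [p, ih (List.Pairwise.nil) hj.of_cons, List.filter_cons]
    simp
  | case3 x rs v js hlt ih =>
    -- x < v and j strictly sorted: x is below every element of v :: js, so dropping x changes no membership
    have hx : ∀ w ∈ v :: js, (decide (w ∈ x :: rs)) = (decide (w ∈ rs)) := by
      intro w hw
      have hxw : x < w := by
        rcases List.mem_cons.mp hw with rfl | hw'
        · exact hlt
        · exact lt_trans hlt ((List.pairwise_cons.mp hj).1 w hw')
      simp [List.mem_cons, (ne_of_lt hxw).symm]
    have hx2 : ∀ w ∈ v :: js, (!decide (w ∈ x :: rs)) = (!decide (w ∈ rs)) := fun w hw => by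
      rw [hx w hw]
    rw [ih hr.of_cons hj, ← List.filter_congr hx, ← List.filter_congr hx2]
  | case4 rs v js p hlt ih =>
    -- heads equal (x = v already substituted): v joins common, both heads advance
    have hjt := List.pairwise_cons.mp hj
    have hx : ∀ w ∈ js, (decide (w ∈ v :: rs)) = (decide (w ∈ rs)) := by
      intro w hw
      simp [List.mem_cons, (ne_of_lt (hjt.1 w hw)).symm]
    have hx2 : ∀ w ∈ js, (!decide (w ∈ v :: rs)) = (!decide (w ∈ rs)) := fun w hw => by
      rw [hx w hw]
    simp only [p, ih hr.of_cons hj.of_cons, ← List.filter_congr hx, ← List.filter_congr hx2,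
      List.filter_cons]
    simp
  | case5 x rs v js hlt hne p ih =>
    have hvx : v < x := lt_of_le_of_ne (not_lt.mp hlt) (fun h => hne h.symm)
    have hrt := List.pairwise_cons.mp hr
    have hv : v ∉ x :: rs := by
      intro hmem
      rcases List.mem_cons.mp hmem with rfl | hmem'
      · exact lt_irrefl _ hvx
      · exact lt_irrefl _ (lt_trans hvx (hrt.1 v hmem'))
    simp only [p, ih hr hj.of_cons, List.filter_cons]
    simp [hv]

theorem compare_skills_eq (rs js : List String) :
    compare_skills rs js = compare_skills_alt rs js := by
  simp only [compare_skills, compare_skills_alt]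
  have hr := PySem.List.sorted_ofList_pairwise_lt (rs.map PySem.Str.lower)
  have hj := PySem.List.sorted_ofList_pairwise_lt (js.map PySem.Str.lower)
  rw [pvMergeLoop_eq_filters _ _ hr hj]
  have hmemR : ∀ w : String,
      (w ∈ PySem.List.sorted (PySem.Set.ofList (rs.map PySem.Str.lower)) (fun x => x) false)
        ↔ w ∈ PySem.Set.ofList (rs.map PySem.Str.lower) := fun w =>
    (PySem.List.sorted_perm _ _ _).mem_iff
  -- switch the membership test from the sorted resume list to the resume set (equal lists)
  have hsw : ∀ q : Bool → Bool,
      (PySem.List.sorted (PySem.Set.ofList (js.map PySem.Str.lower)) (fun x => x) false).filter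
          (fun v => q (decide (v ∈ PySem.List.sorted (PySem.Set.ofList (rs.map PySem.Str.lower)) (fun x => x) false)))
        = (PySem.List.sorted (PySem.Set.ofList (js.map PySem.Str.lower)) (fun x => x) false).filter
          (fun v => q (decide (v ∈ PySem.Set.ofList (rs.map PySem.Str.lower)))) := by
    intro q
    exact List.filter_congr (fun w _ => congrArg q (decide_eq_decide.mpr (hmemR w)))
  have hc : PySem.List.sorted
        (PySem.Set.inter (PySem.Set.ofList (rs.map PySem.Str.lower)) (PySem.Set.ofList (js.map PySem.Str.lower)))
        (fun x => x) false
      = (PySem.List.sorted (PySem.Set.ofList (js.map PySem.Str.lower)) (fun x => x) false).filter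
          (fun v => decide (v ∈ PySem.List.sorted (PySem.Set.ofList (rs.map PySem.Str.lower)) (fun x => x) false)) := by
    rw [hsw (fun b => b)]
    apply PySem.List.sorted_eq_of_perm_of_pairwise_lt
    · refine ((PySem.List.sorted_perm _ _ _).filter _).trans ?_
      apply List.perm_of_nodup_nodup_toFinset_eq
      · exact (PySem.Set.nodup_ofList _).filter _
      · exact PySem.Set.nodup_inter _ _ (PySem.Set.nodup_ofList _)
      · ext w
        simp [PySem.Set.mem_inter, and_comm]
    · exact (PySem.List.sorted_ofList_pairwise_lt _).filter _
  have hm : PySem.List.sorted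
        (PySem.Set.diff (PySem.Set.ofList (js.map PySem.Str.lower)) (PySem.Set.ofList (rs.map PySem.Str.lower)))
        (fun x => x) false
      = (PySem.List.sorted (PySem.Set.ofList (js.map PySem.Str.lower)) (fun x => x) false).filter
          (fun v => !decide (v ∈ PySem.List.sorted (PySem.Set.ofList (rs.map PySem.Str.lower)) (fun x => x) false)) := by
    rw [hsw (fun b => !b)]
    apply PySem.List.sorted_eq_of_perm_of_pairwise_lt
    · refine ((PySem.List.sorted_perm _ _ _).filter _).trans ?_
      apply List.perm_of_nodup_nodup_toFinset_eq
      · exact (PySem.Set.nodup_ofList _).filter _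
      · exact PySem.Set.nodup_diff _ _ (PySem.Set.nodup_ofList _)
      · ext w
        simp [PySem.Set.mem_diff]
    · exact (PySem.List.sorted_ofList_pairwise_lt _).filter _
  rw [hc, hm]

-- ===== VERDICT =====
theorem compare_skills_spec : Claim_equal_compare_skills := by
  intro rs js _
  unfold Spec_compare_skills
  exact compare_skills_eq rs js
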